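-- pv_equiv track=rewrite | github.com/busaiku0084/ook-lang-playground | text_to_ook.py | text_to_brainfuck
-- ===== SOURCE A (Python) =====
-- def text_to_brainfuck(text):
--     bf_code = []
--     prev_ascii = 0  # 直前の ASCII 値を保持
--
--     for char in text:
--         if char == "\n":
--             bf_code.append("\n")  # **改行をそのまま記録**
--             prev_ascii = 0  # **改行後の文字の ASCII 調整**
--             continue
--
--         ascii_val = ord(char)  # 文字をASCIIコードに変換
--         diff = ascii_val - prev_ascii  # 前の文字との差分を計算
--
--         if diff > 0:
--             bf_code.append("+" * diff)  # 差分の分だけ `+` を増やす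
--         elif diff < 0:
--             bf_code.append("-" * abs(diff))  # 差分の分だけ `-` を増やす
--
--         bf_code.append(".")  # 出力
--         prev_ascii = ascii_val  # 現在の ASCII 値を記録
--
--     return "".join(bf_code)
-- ===== SOURCE B (Python) =====
-- def text_to_brainfuck(text):
--     # Stateless formulation: each character's emitted code depends only on the
--     # adjacent pair (previous character or start-of-text/newline, current character),
--     # so the output is a flat map over zip(prevs, text) with no running accumulator.
--     prevs = [0] + [0 if ch == "\n" else ord(ch) for ch in text[:-1]]
--     return "".join(_emit(p, c) for p, c in zip(prevs, text))
--
--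
-- def _emit(p, c):
--     if c == "\n":
--         return "\n"
--     d = ord(c) - p
--     if d > 0:
--         return "+" * d + "."
--     if d < 0:
--         return "-" * (-d) + "."
--     return "."
-- ===== Notes on version B (the rewrite author's own statement) =====
-- stated objective: alternative
-- what changed: B replaces A's stateful single pass (mutable prev_ascii with a newline branch and continue) by a stateless formulation: it precomputes the list of predecessor codes (0 at start and after a newline) and flat-maps a pure pair-encoding function over zip(prevs, text).
import Mathlib
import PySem

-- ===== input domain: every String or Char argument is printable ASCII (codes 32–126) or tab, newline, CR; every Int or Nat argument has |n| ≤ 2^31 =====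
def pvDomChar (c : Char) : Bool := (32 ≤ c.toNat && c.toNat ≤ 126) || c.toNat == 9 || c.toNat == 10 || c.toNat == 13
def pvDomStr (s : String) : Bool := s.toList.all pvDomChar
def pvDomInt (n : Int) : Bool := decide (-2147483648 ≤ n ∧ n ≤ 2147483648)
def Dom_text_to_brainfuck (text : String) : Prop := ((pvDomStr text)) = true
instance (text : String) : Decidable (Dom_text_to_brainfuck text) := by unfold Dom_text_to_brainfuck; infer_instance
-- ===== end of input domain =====

-- B replaces A's stateful pass (mutable prev_ascii, newline branch + continue) by a stateless
-- flat map of a pure pair-encoder over zip(predecessor codes, text); same cost, same output.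

-- ===== PORT A =====
-- A's loop over the characters, carrying prev_ascii; emitted pieces accumulated as chars.
def pvGoA (prev : Int) : List Char → List Char
  | [] => []
  | c :: cs =>
    if c = '\n' then '\n' :: pvGoA 0 cs
    else
      let a : Int := (c.toNat : Int)
      let d : Int := a - prev
      (if d > 0 then List.replicate d.toNat '+'
       else if d < 0 then List.replicate (-d).toNat '-'
       else []) ++ '.' :: pvGoA a cs

def text_to_brainfuck (text : String) : String := String.ofList (pvGoA 0 text.toList)

-- ===== PORT B =====
-- Source B's _emit: the code emitted for one character, given its predecessor's code
def pvEmit (p : Int) (c : Char) : List Char :=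
  if c = '\n' then ['\n']
  else
    let d : Int := (c.toNat : Int) - p
    if d > 0 then List.replicate d.toNat '+' ++ ['.']
    else if d < 0 then List.replicate (-d).toNat '-' ++ ['.']
    else ['.']

-- Source B's prevs list: [0] + [0 if ch == "\n" else ord(ch) for ch in text[:-1]]
def pvPrevs (cs : List Char) : List Int :=
  0 :: cs.dropLast.map (fun c => if c = '\n' then 0 else (c.toNat : Int))

def text_to_brainfuck_alt (text : String) : String :=
  String.ofList ((((pvPrevs text.toList).zip text.toList).map (fun pc => pvEmit pc.1 pc.2)).flatten)

-- ===== PRECONDITION & SPEC =====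
def Spec_text_to_brainfuck (text : String) (out : String) : Prop := out = text_to_brainfuck_alt text
instance (text : String) (out : String) : Decidable (Spec_text_to_brainfuck text out) := by unfold Spec_text_to_brainfuck; infer_instance

-- ===== CLAIM (what is proved, stated in full; the proofs are below) =====
def Claim_equal_text_to_brainfuck : Prop := ∀ (text : String), Dom_text_to_brainfuck text → Spec_text_to_brainfuck text (text_to_brainfuck text)

-- ===== LEMMAS AND PROOFS =====

-- A's one step is B's pair encoding followed by the recursive call at the successor state
theorem pvGoA_cons (prev : Int) (c : Char) (cs : List Char) :
    pvGoA prev (c :: cs)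
      = pvEmit prev c ++ pvGoA (if c = '\n' then 0 else (c.toNat : Int)) cs := by
  by_cases hc : c = '\n'
  · simp [pvGoA, pvEmit, hc]
  · simp only [pvGoA, pvEmit, if_neg hc]
    split_ifs <;> simp

theorem pvGoA_eq_flatten (cs : List Char) : ∀ (prev : Int),
    pvGoA prev cs = (((prev :: cs.dropLast.map (fun c => if c = '\n' then 0 else (c.toNat : Int))).zip cs).map
      (fun pc => pvEmit pc.1 pc.2)).flatten := by
  induction cs with
  | nil => intro prev; simp [pvGoA]
  | cons c cs ih =>
    intro prev
    rw [pvGoA_cons]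
    cases cs with
    | nil => simp [pvGoA]
    | cons c' cs' =>
      rw [ih]
      simp [List.dropLast_cons₂]

-- ===== VERDICT (by name: the statement is the Claim_ definition above) =====
theorem text_to_brainfuck_spec : Claim_equal_text_to_brainfuck := by
  intro text _
  unfold Spec_text_to_brainfuck text_to_brainfuck text_to_brainfuck_alt pvPrevs
  rw [pvGoA_eq_flatten]
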